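-- pv_equiv track=rewrite | github.com/MistMezalla/Laptop-Backup | CS 201 (Algorithm)/Lecture Qns/Python/Knapsack without profit.py | knapscak_without_profit_bottom_up
-- ===== SOURCE A (Python) =====
-- def knapscak_without_profit_bottom_up(sizes,limit):
--     # the below method creates references of (limit+1) times where ref are made of [-1]*len(sizes)
--     #memo = [[-1]*(len(sizes))]*(limit+1)
--     memo = [[-1]*len(sizes) for _ in range(limit+1)]
--
--     for i in range(len(memo)):
--         memo[i][-1] = sizes[-1] if sizes[-1] <= i else 0
--
--     for j in range(len(memo[0]) - 2,-1,-1):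
--         for i in range(len(memo)):
--             res1 = 0
--             res2 = memo[i][j+1]
--             if i >= sizes[j]:
--                 res1 = memo[i-sizes[j]][j+1] + sizes[j]
--
--             memo[i][j] = max(res2,res1)
--
--     return memo[limit][0]
-- ===== SOURCE B (Python) =====
-- def knapscak_without_profit_bottom_up(sizes, limit):
--     reachable = {0}
--     for s in sizes:
--         reachable |= {r + s for r in reachable if r + s <= limit}
--     return max(reachable)
-- ===== Notes on version B (the rewrite author's own statement) =====
-- stated objective: faster
-- what changed: Replaces the (limit+1) x len(sizes) memo table filled column-by-column from the right (O(n*limit) cells) by a single forward pass maintaining the set of reachable subset sums capped at limit (O(n*R), R = number of reachable sums, typically far below limit) and returning its maximum; Pre_ excludes exactly the inputs where A raises IndexError (empty sizes, negative limit, a negative size before the last position).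
-- intended difference: On inputs whose last size is negative (A returns there), A's wraparound-initialised last column 'memo[i][-1] = sizes[-1] if sizes[-1] <= i else 0' forces the negative item into the base case so A returns a diminished total (e.g. -1 on ([-1], 2)); B returns the true maximum subset sum not exceeding limit (0 there), the intended value. — e.g. on knapscak_without_profit_bottom_up([-1], 2): A returns -1, B returns 0
import Mathlib
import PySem

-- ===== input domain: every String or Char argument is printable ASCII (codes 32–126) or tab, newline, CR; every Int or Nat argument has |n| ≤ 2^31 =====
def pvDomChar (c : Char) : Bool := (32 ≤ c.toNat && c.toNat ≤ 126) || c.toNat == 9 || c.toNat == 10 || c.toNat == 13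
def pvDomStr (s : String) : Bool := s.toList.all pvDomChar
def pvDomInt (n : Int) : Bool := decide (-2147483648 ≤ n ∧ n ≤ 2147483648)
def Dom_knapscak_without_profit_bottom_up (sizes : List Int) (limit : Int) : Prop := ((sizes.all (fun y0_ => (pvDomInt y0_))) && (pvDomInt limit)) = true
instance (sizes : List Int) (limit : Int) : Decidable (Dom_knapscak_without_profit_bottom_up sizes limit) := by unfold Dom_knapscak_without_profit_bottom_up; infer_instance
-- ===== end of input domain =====

-- B replaces A's (limit+1)×n bottom-up memo table by the idiomatic forward pass over the set of
-- reachable subset sums; A = B on Pre_ outside D_ (negative last size, where A's value is an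
-- artefact of its memo[i][-1] initialisation and B returns the intended maximum).

-- ===== PORT A =====
-- A-side helpers: memo[i][j] = v with Python index semantics (read row, set cell, write row back)
def pvSetAt (m : List (List Int)) (i j v : Int) : List (List Int) :=
  PySem.List.pySetD m i (PySem.List.pySetD (PySem.List.pyGetD m i []) j v)

-- memo = [[-1]*len(sizes) for _ in range(limit+1)]
def pvAInit (sizes : List Int) (limit : Int) : List (List Int) :=
  (PySem.List.pyRange 0 (limit+1) 1).map (fun _ => List.replicate sizes.length (-1))

-- body of 'for i in range(len(memo)): memo[i][-1] = sizes[-1] if sizes[-1] <= i else 0'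
def pvAStep1 (sizes : List Int) (m : List (List Int)) (i : Int) : List (List Int) :=
  pvSetAt m i (-1) (if PySem.List.pyGetD sizes (-1) 0 ≤ i then PySem.List.pyGetD sizes (-1) 0 else 0)

-- body of the inner 'for i in range(len(memo)) : …' at column j
def pvAInner (sizes : List Int) (j : Int) (m : List (List Int)) (i : Int) : List (List Int) :=
  let res1 : Int := 0
  let res2 : Int := PySem.List.pyGetD (PySem.List.pyGetD m i []) (j+1) 0
  let res1 : Int := if i ≥ PySem.List.pyGetD sizes j 0 then
      PySem.List.pyGetD (PySem.List.pyGetD m (i - PySem.List.pyGetD sizes j 0) []) (j+1) 0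
        + PySem.List.pyGetD sizes j 0
    else res1
  pvSetAt m i j (max res2 res1)

-- body of the outer 'for j in range(len(memo[0]) - 2, -1, -1): …'
def pvAOuter (sizes : List Int) (m : List (List Int)) (j : Int) : List (List Int) :=
  (PySem.List.pyRange 0 (m.length : Int) 1).foldl (pvAInner sizes j) m

def knapscak_without_profit_bottom_up (sizes : List Int) (limit : Int) : Int :=
  let memo := pvAInit sizes limit
  let memo := (PySem.List.pyRange 0 (memo.length : Int) 1).foldl (pvAStep1 sizes) memo
  let memo := (PySem.List.pyRange (((PySem.List.pyGetD memo 0 []).length : Int) - 2) (-1) (-1)).foldl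
      (pvAOuter sizes) memo
  PySem.List.pyGetD (PySem.List.pyGetD memo limit []) 0 0

-- ===== PORT B =====
-- body of 'reachable |= {r + s for r in reachable if r + s <= limit}'
def pvBStep (limit : Int) (reach : PySem.Set Int) (s : Int) : PySem.Set Int :=
  PySem.Set.update reach
    (PySem.Set.ofList ((reach.filter (fun r => decide (r + s ≤ limit))).map (fun r => r + s)))

def knapscak_without_profit_bottom_up_alt (sizes : List Int) (limit : Int) : Int :=
  let reach := sizes.foldl (pvBStep limit) (PySem.Set.ofList [0])
  (PySem.List.max? reach (fun x => x)).getD 0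

-- ===== PRECONDITION & SPEC =====
-- Pre_ excludes exactly the inputs on which A raises IndexError: empty sizes (sizes[-1]),
-- negative limit (memo[0] of an empty memo), and a negative size before the last position
-- (memo[i-sizes[j]] indexes past the end of memo).
def Pre_knapscak_without_profit_bottom_up (sizes : List Int) (limit : Int) : Prop :=
  sizes ≠ [] ∧ 0 ≤ limit ∧ ∀ x ∈ sizes.dropLast, 0 ≤ x
instance (sizes : List Int) (limit : Int) : Decidable (Pre_knapscak_without_profit_bottom_up sizes limit) := by
  unfold Pre_knapscak_without_profit_bottom_up; infer_instance

def pvWitness_knapscak_without_profit_bottom_up : List Int × Int := ([2, 3, 4], 6)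

-- On inputs whose last size is negative, A's wraparound-initialised last column ("memo[i][-1] =
-- sizes[-1] if sizes[-1] <= i else 0", always true for i ≥ 0) forces the negative item into the
-- table's base case, so A returns a diminished total (e.g. -1 on ([-1], 2)); B returns the true
-- maximum subset sum not exceeding limit (0 there), which is the intended value.
def D_knapscak_without_profit_bottom_up (sizes : List Int) (limit : Int) : Prop :=
  sizes.getLastD 0 < 0
instance (sizes : List Int) (limit : Int) : Decidable (D_knapscak_without_profit_bottom_up sizes limit) := by
  unfold D_knapscak_without_profit_bottom_up; infer_instance

def Spec_knapscak_without_profit_bottom_up (sizes : List Int) (limit : Int) (out : Int) : Prop :=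
  ¬ D_knapscak_without_profit_bottom_up sizes limit → out = knapscak_without_profit_bottom_up_alt sizes limit
instance (sizes : List Int) (limit : Int) (out : Int) : Decidable (Spec_knapscak_without_profit_bottom_up sizes limit out) := by
  unfold Spec_knapscak_without_profit_bottom_up; infer_instance

def pvDiffWitness_knapscak_without_profit_bottom_up : List Int × Int := ([-1], 2)
def pvDiffWitnessOut_knapscak_without_profit_bottom_up : Int × Int := (-1, 0)

-- ===== CLAIM (what is proved, stated in full; the proofs are below) =====
def Claim_unchanged_knapscak_without_profit_bottom_up : Prop := ∀ (sizes : List Int) (limit : Int), Dom_knapscak_without_profit_bottom_up sizes limit → Pre_knapscak_without_profit_bottom_up sizes limit → Spec_knapscak_without_profit_bottom_up sizes limit (knapscak_without_profit_bottom_up sizes limit)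
def Claim_changed_knapscak_without_profit_bottom_up : Prop := Dom_knapscak_without_profit_bottom_up (pvDiffWitness_knapscak_without_profit_bottom_up.1) (pvDiffWitness_knapscak_without_profit_bottom_up.2) ∧ Pre_knapscak_without_profit_bottom_up (pvDiffWitness_knapscak_without_profit_bottom_up.1) (pvDiffWitness_knapscak_without_profit_bottom_up.2) ∧ D_knapscak_without_profit_bottom_up (pvDiffWitness_knapscak_without_profit_bottom_up.1) (pvDiffWitness_knapscak_without_profit_bottom_up.2) ∧ knapscak_without_profit_bottom_up (pvDiffWitness_knapscak_without_profit_bottom_up.1) (pvDiffWitness_knapscak_without_profit_bottom_up.2) = pvDiffWitnessOut_knapscak_without_profit_bottom_up.1 ∧ knapscak_without_profit_bottom_up_alt (pvDiffWitness_knapscak_without_profit_bottom_up.1) (pvDiffWitness_knapscak_without_profit_bottom_up.2) = pvDiffWitnessOut_knapscak_without_profit_bottom_up.2 ∧ pvDiffWitnessOut_knapscak_without_profit_bottom_up.1 ≠ pvDiffWitnessOut_knapscak_without_profit_bottom_up.2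

-- ===== LEMMAS AND PROOFS =====

-- A's per-cell value: pvG (sizes.drop j) i is what memo[i][j] holds after column j is filled.
def pvG : List Int → Int → Int
  | [], _ => 0
  | [s], i => if s ≤ i then s else 0
  | s :: t :: r, i => max (pvG (t :: r) i) (if s ≤ i then pvG (t :: r) (i - s) + s else 0)

-- "v is the maximum sum of a sublist of l not exceeding c"
def pvIsMax (l : List Int) (c v : Int) : Prop :=
  (∃ T : List Int, T.Sublist l ∧ T.sum = v ∧ v ≤ c) ∧ ∀ T : List Int, T.Sublist l → T.sum ≤ c → T.sum ≤ v

theorem pvIsMax_unique {l : List Int} {c v w : Int}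
    (hv : pvIsMax l c v) (hw : pvIsMax l c w) : v = w := by
  obtain ⟨⟨T, hT, hs, hc⟩, hmax⟩ := hv
  obtain ⟨⟨U, hU, hsu, hcu⟩, hmaxu⟩ := hw
  have h1 := hmaxu T hT (hs ▸ hc)
  have h2 := hmax U hU (hsu ▸ hcu)
  omega

theorem pv_sum_nonneg {l T : List Int} (h : ∀ x ∈ l, 0 ≤ x) (hT : T.Sublist l) : 0 ≤ T.sum := by
  apply List.sum_nonneg
  intro x hx
  exact h x (hT.mem hx)

theorem pvG_isMax : ∀ (l : List Int) (i : Int), l ≠ [] → (∀ x ∈ l, 0 ≤ x) → 0 ≤ i →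
    pvIsMax l i (pvG l i) := by
  intro l
  induction l with
  | nil => intro i h; exact absurd rfl h
  | cons s rest ih =>
    intro i _ hnn h0
    have hs : 0 ≤ s := hnn s (by simp)
    cases rest with
    | nil =>
      constructor
      · by_cases hsi : s ≤ i
        · exact ⟨[s], by simp [pvG, hsi]⟩
        · exact ⟨[], by simp [pvG, hsi, h0]⟩
      · intro T hT hTc
        rcases List.sublist_singleton.mp hT with rfl | rfl
        · simp [pvG]
          split <;> omega
        · simp [pvG] at hTc ⊢
          split <;> omega
    | cons t r =>
      have hnn' : ∀ x ∈ t :: r, 0 ≤ x := fun x hx => hnn x (by simp [hx])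
      have h2 := ih i (by simp) hnn' h0
      have hv2 : 0 ≤ pvG (t :: r) i := by
        have := h2.2 [] (by simp) (by simpa using h0)
        simpa using this
      by_cases hsi : s ≤ i
      · have h1 := ih (i - s) (by simp) hnn' (by omega)
        constructor
        · rcases le_total (pvG (t :: r) (i - s) + s) (pvG (t :: r) i) with hle | hle
          · obtain ⟨T, hT, hsum, hc⟩ := h2.1
            exact ⟨T, hT.cons s, by simp [pvG, hsi]; omega⟩
          · obtain ⟨T, hT, hsum, hc⟩ := h1.1
            refine ⟨s :: T, List.cons_sublist_cons.mpr hT, ?_⟩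
            simp [pvG, hsi]
            constructor
            · omega
            · omega
        · intro T hT hTc
          rcases List.sublist_cons_iff.mp hT with hT' | ⟨T', rfl, hT'⟩
          · have := h2.2 T hT' hTc
            simp [pvG, hsi]; omega
          · have hT'c : T'.sum ≤ i - s := by simp at hTc; omega
            have := h1.2 T' hT' hT'c
            simp [pvG, hsi] at *
            omega
      · constructor
        · obtain ⟨T, hT, hsum, hc⟩ := h2.1
          exact ⟨T, hT.cons s, by simp [pvG, hsi]; omega⟩
        · intro T hT hTc
          rcases List.sublist_cons_iff.mp hT with hT' | ⟨T', rfl, hT'⟩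
          · have := h2.2 T hT' hTc
            simp [pvG, hsi]; omega
          · have hpos : 0 ≤ T'.sum := pv_sum_nonneg hnn' hT'
            simp at hTc
            omega

theorem pvB_mem_step {limit : Int} {reach : PySem.Set Int} {s x : Int} :
    x ∈ pvBStep limit reach s ↔ x ∈ reach ∨ ∃ r ∈ reach, x = r + s ∧ x ≤ limit := by
  unfold pvBStep
  rw [PySem.Set.mem_update]
  simp only [PySem.Set.mem_ofList, List.mem_map, List.mem_filter, decide_eq_true_eq]
  constructor
  · rintro (h | ⟨r, ⟨hr, hc⟩, rfl⟩)
    · exact Or.inl h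
    · exact Or.inr ⟨r, hr, rfl, hc⟩
  · rintro (h | ⟨r, hr, rfl, hc⟩)
    · exact Or.inl h
    · exact Or.inr ⟨r, ⟨hr, hc⟩, rfl⟩

theorem pvB_reach_mem (limit : Int) (h0 : 0 ≤ limit) :
    ∀ (sizes : List Int), (∀ x ∈ sizes, 0 ≤ x) → ∀ (x : Int),
    (x ∈ sizes.foldl (pvBStep limit) (PySem.Set.ofList [0]) ↔
      ∃ T : List Int, T.Sublist sizes ∧ T.sum = x ∧ x ≤ limit) := by
  intro sizes
  induction sizes using List.reverseRecOn with
  | nil =>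
    intro _ x
    simp only [List.foldl_nil]
    constructor
    · intro h
      have hx : x = 0 := by simpa [PySem.Set.mem_ofList] using h
      exact ⟨[], by simp [hx, h0]⟩
    · rintro ⟨T, hT, rfl, _⟩
      have : T = [] := List.sublist_nil.mp hT
      simp [this, PySem.Set.mem_ofList]
  | append_singleton p s ih =>
    intro hnn x
    have hnp : ∀ y ∈ p, 0 ≤ y := fun y hy => hnn y (by simp [hy])
    have hs : 0 ≤ s := hnn s (by simp)
    rw [List.foldl_append]
    simp only [List.foldl_cons, List.foldl_nil]
    rw [pvB_mem_step]
    simp only [ih hnp]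
    constructor
    · rintro (⟨T, hT, rfl, hc⟩ | ⟨r, ⟨T, hT, rfl, hcr⟩, rfl, hc⟩)
      · exact ⟨T, hT.trans (List.sublist_append_left p [s]), rfl, hc⟩
      · exact ⟨T ++ [s], hT.append (List.Sublist.refl [s]), by simp, hc⟩
    · rintro ⟨T, hT, rfl, hc⟩
      rcases List.sublist_append_iff.mp hT with ⟨T1, T2, rfl, h1, h2⟩
      rcases List.sublist_singleton.mp h2 with rfl | rfl
      · exact Or.inl ⟨T1, by simpa using h1, by simp, by simpa using hc⟩
      · refine Or.inr ⟨T1.sum, ⟨T1, h1, rfl, by simp at hc; omega⟩, by simp, hc⟩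

theorem pvB_isMax (sizes : List Int) (limit : Int) (h0 : 0 ≤ limit) (hnn : ∀ x ∈ sizes, 0 ≤ x) :
    pvIsMax sizes limit (knapscak_without_profit_bottom_up_alt sizes limit) := by
  have halt : knapscak_without_profit_bottom_up_alt sizes limit
      = (PySem.List.max? (sizes.foldl (pvBStep limit) (PySem.Set.ofList [0])) (fun x => x)).getD 0 := rfl
  rw [halt]
  set reach := sizes.foldl (pvBStep limit) (PySem.Set.ofList [0]) with hreach
  have h0mem : (0:Int) ∈ reach := by
    rw [hreach, pvB_reach_mem limit h0 sizes hnn]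
    exact ⟨[], by simp [h0]⟩
  have hne : reach ≠ [] := List.ne_nil_of_mem h0mem
  obtain ⟨m, hm⟩ : ∃ m, PySem.List.max? reach (fun x => x) = some m := by
    rcases h : PySem.List.max? reach (fun x => x) with _ | m
    · rw [PySem.List.max?_eq_none_iff] at h
      exact absurd h hne
    · exact ⟨m, rfl⟩
  rw [hm]
  simp only [Option.getD_some]
  constructor
  · have := PySem.List.max?_mem hm
    rw [hreach, pvB_reach_mem limit h0 sizes hnn] at this
    exact this
  · intro T hT hTc
    have hmemT : T.sum ∈ reach := by
      rw [hreach, pvB_reach_mem limit h0 sizes hnn]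
      exact ⟨T, hT, rfl, hTc⟩
    exact PySem.List.max?_isMax hm T.sum hmemT

def pvRow (sizes : List Int) (j₀ : Nat) (i : Int) : List Int :=
  (List.range sizes.length).map (fun j => if j₀ ≤ j then pvG (sizes.drop j) i else -1)

def pvMat (sizes : List Int) (limit : Int) (j₀ : Nat) : List (List Int) :=
  (PySem.List.pyRange 0 (limit+1) 1).map (pvRow sizes j₀)

-- Python memo[i][-1] = v on a non-empty row sets the last cell
theorem pv_pySetD_neg_one (xs : List Int) (v : Int) (h : xs ≠ []) :
    PySem.List.pySetD xs (-1) v = xs.set (xs.length - 1) v := by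
  have hlen : 0 < xs.length := List.length_pos_iff.mpr h
  simp only [PySem.List.pySetD, PySem.List.pySet?, PySem.List.pyIdx?]
  have h2 : (-(xs.length:Int) ≤ -1) := by omega
  simp [h2]

theorem pvRow_length (sizes : List Int) (j₀ : Nat) (i : Int) :
    (pvRow sizes j₀ i).length = sizes.length := by
  simp [pvRow]

theorem pvRow_get (sizes : List Int) (j₀ : Nat) (i : Int) (j : Nat) (hj : j < sizes.length) :
    PySem.List.pyGetD (pvRow sizes j₀ i) (j : Int) 0
      = if j₀ ≤ j then pvG (sizes.drop j) i else -1 := by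
  rw [PySem.List.pyGetD_natCast]
  rw [pvRow]
  rw [List.getD_eq_getElem?_getD]
  simp [hj]

-- the generic "set row k of a half-updated matrix" step
theorem pv_mix_set (f g : Int → List Int) (limit : Int) (k : Nat) (hk : (k : Int) < limit + 1) :
    (((PySem.List.pyRange 0 (limit+1) 1).map (fun i => if i < (k:Int) then g i else f i)).set k (g k))
      = (PySem.List.pyRange 0 (limit+1) 1).map (fun i => if i < (k:Int)+1 then g i else f i) := by
  apply List.ext_getElem
  · simp
  · intro a h1 h2
    have ha : a < (limit+1-0).toNat := by simpa [PySem.List.length_pyRange_one] using h2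
    rw [List.getElem_set]
    simp only [List.getElem_map, PySem.List.getElem_pyRange_one]
    by_cases hak : k = a
    · subst hak
      simp
    · have heq : ((0:Int) + a < (k:Int)) ↔ ((0:Int) + a < (k:Int)+1) := by
        have : (a:Int) ≠ (k:Int) := by exact_mod_cast fun h => hak (by exact_mod_cast h.symm)
        omega
      have heq2 : (a < k) ↔ (a ≤ k) := by omega
      simp [hak, heq2]

-- generic single-pass loop over the rows
theorem pv_foldl_set (N : Int) (hN : 0 ≤ N) (f g : Int → List Int)
    (step : List (List Int) → Int → List (List Int))
    (hstep : ∀ k : Nat, (k : Int) < N →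
      step ((PySem.List.pyRange 0 N 1).map (fun i => if i < (k:Int) then g i else f i)) (k:Int)
        = (PySem.List.pyRange 0 N 1).map (fun i => if i < (k:Int)+1 then g i else f i)) :
    (PySem.List.pyRange 0 N 1).foldl step ((PySem.List.pyRange 0 N 1).map f)
      = (PySem.List.pyRange 0 N 1).map (fun i => if i < N then g i else f i) := by
  have hmix0 : (PySem.List.pyRange 0 N 1).map f
      = (PySem.List.pyRange 0 N 1).map (fun i => if i < (0:Int) then g i else f i) := by
    apply List.map_congr_left
    intro i hi
    have := (PySem.List.mem_pyRange_one.mp hi).1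
    simp [not_lt.mpr this]
  have aux : ∀ k : Nat, (k : Int) ≤ N →
      (PySem.List.pyRange 0 (k:Int) 1).foldl step ((PySem.List.pyRange 0 N 1).map f)
        = (PySem.List.pyRange 0 N 1).map (fun i => if i < (k:Int) then g i else f i) := by
    intro k
    induction k with
    | zero =>
      intro _
      have hnil : PySem.List.pyRange ((0:Int)) (((0:Nat)):Int) 1 = [] :=
        PySem.List.pyRange_one_eq_nil (by norm_num)
      rw [hnil]
      simpa using hmix0
    | succ k ih =>
      intro hk
      have hk' : (k : Int) ≤ N := by push_cast at hk ⊢; omega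
      have hkN : (k : Int) < N := by push_cast at hk; omega
      have : ((k+1 : Nat) : Int) = (k : Int) + 1 := by push_cast; ring
      rw [this, PySem.List.pyRange_one_succ_right (by positivity), List.foldl_append]
      rw [ih hk']
      simpa using hstep k hkN
  have hNN : ((N.toNat : Nat) : Int) = N := Int.toNat_of_nonneg hN
  have haux := aux N.toNat (by omega)
  rw [hNN] at haux
  rw [haux]

theorem pvRow_last (sizes : List Int) (i : Int) (hne : sizes ≠ []) :
    (List.replicate sizes.length (-1:Int)).set (sizes.length - 1)
      (if sizes.getLast hne ≤ i then sizes.getLast hne else 0)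
      = pvRow sizes (sizes.length - 1) i := by
  have hn : 0 < sizes.length := List.length_pos_iff.mpr hne
  apply List.ext_getElem
  · simp [pvRow]
  · intro j h1 h2
    have hj : j < sizes.length := by simpa using h1
    rw [List.getElem_set]
    simp only [pvRow, List.getElem_map, List.getElem_range]
    by_cases hjl : sizes.length - 1 = j
    · subst hjl
      have hdrop : sizes.drop (sizes.length - 1) = [sizes.getLast hne] :=
        List.drop_length_sub_one hne
      simp [hdrop, pvG]
    · have hlt : ¬ (sizes.length - 1 ≤ j) := by omega
      simp [hjl, hlt]

theorem pvA_first (sizes : List Int) (limit : Int) (hne : sizes ≠ []) (h0 : 0 ≤ limit) :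
    (PySem.List.pyRange 0 ((pvAInit sizes limit).length : Int) 1).foldl (pvAStep1 sizes)
      (pvAInit sizes limit) = pvMat sizes limit (sizes.length - 1) := by
  have hn : 0 < sizes.length := List.length_pos_iff.mpr hne
  have hlen : ((pvAInit sizes limit).length : Int) = limit + 1 := by
    simp [pvAInit, PySem.List.length_pyRange_one]
    omega
  rw [hlen]
  unfold pvAInit
  have hstep : ∀ k : Nat, (k : Int) < limit + 1 →
      pvAStep1 sizes ((PySem.List.pyRange 0 (limit+1) 1).map
          (fun i => if i < (k:Int) then pvRow sizes (sizes.length - 1) i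
                    else (fun _ => List.replicate sizes.length (-1:Int)) i)) (k:Int)
        = (PySem.List.pyRange 0 (limit+1) 1).map
          (fun i => if i < (k:Int)+1 then pvRow sizes (sizes.length - 1) i
                    else (fun _ => List.replicate sizes.length (-1:Int)) i) := by
    intro k hk
    unfold pvAStep1 pvSetAt
    rw [PySem.List.pyGetD_neg_one sizes 0 hne]
    rw [PySem.List.pyGetD_map_pyRange_of_nonneg _ _ _ _ (by positivity) hk]
    rw [if_neg (lt_irrefl (k:Int))]
    rw [pv_pySetD_neg_one _ _ (by simp; omega)]
    rw [List.length_replicate]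
    rw [pvRow_last sizes (k:Int) hne]
    rw [PySem.List.pySetD_natCast]
    exact pv_mix_set _ _ limit k hk
  rw [pv_foldl_set (limit+1) (by omega) _ (pvRow sizes (sizes.length - 1)) _ hstep]
  unfold pvMat
  apply List.map_congr_left
  intro i hi
  have h2 := (PySem.List.mem_pyRange_one.mp hi).2
  simp [h2]

theorem pvRow_set_col (sizes : List Int) (j : Nat) (i : Int) (hj : j < sizes.length) :
    (pvRow sizes (j+1) i).set j (pvG (sizes.drop j) i) = pvRow sizes j i := by
  apply List.ext_getElem
  · simp [pvRow]
  · intro a h1 h2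
    have ha : a < sizes.length := by simpa [pvRow] using h2
    rw [List.getElem_set]
    simp only [pvRow, List.getElem_map, List.getElem_range]
    by_cases hja : j = a
    · subst hja
      simp
    · have : (j + 1 ≤ a) ↔ (j ≤ a) := by omega
      simp [hja, this]

theorem pvA_inner (sizes : List Int) (limit : Int) (j : Nat) (hj : j + 1 < sizes.length)
    (h0 : 0 ≤ limit) (hnn : ∀ x ∈ sizes, 0 ≤ x) :
    pvAOuter sizes (pvMat sizes limit (j+1)) (j : Int) = pvMat sizes limit j := by
  have hjlen : j < sizes.length := by omega
  have hsj0 : 0 ≤ sizes[j] := hnn _ (List.getElem_mem hjlen)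
  have hsj : PySem.List.pyGetD sizes (j:Int) 0 = sizes[j] := by
    rw [PySem.List.pyGetD_natCast, List.getD_eq_getElem?_getD]
    simp [hjlen]
  unfold pvAOuter
  have hlen : ((pvMat sizes limit (j+1)).length : Int) = limit + 1 := by
    simp [pvMat, PySem.List.length_pyRange_one]
    omega
  rw [hlen]
  unfold pvMat
  have hstep : ∀ k : Nat, (k : Int) < limit + 1 →
      pvAInner sizes (j:Int) ((PySem.List.pyRange 0 (limit+1) 1).map
          (fun i => if i < (k:Int) then pvRow sizes j i else pvRow sizes (j+1) i)) (k:Int)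
        = (PySem.List.pyRange 0 (limit+1) 1).map
          (fun i => if i < (k:Int)+1 then pvRow sizes j i else pvRow sizes (j+1) i) := by
    intro k hk
    have hread : ∀ i' : Int, 0 ≤ i' → i' < limit + 1 →
        PySem.List.pyGetD (PySem.List.pyGetD ((PySem.List.pyRange 0 (limit+1) 1).map
            (fun i => if i < (k:Int) then pvRow sizes j i else pvRow sizes (j+1) i)) i' []) ((j:Int)+1) 0
          = pvG (sizes.drop (j+1)) i' := by
      intro i' h1 h2
      rw [PySem.List.pyGetD_map_pyRange_of_nonneg _ _ _ _ h1 h2]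
      have hcast : ((j:Int)+1) = (((j+1:Nat)):Int) := by push_cast; ring
      by_cases hik : i' < (k:Int)
      · rw [if_pos hik, hcast, pvRow_get sizes j i' (j+1) hj]
        simp
      · rw [if_neg hik, hcast, pvRow_get sizes (j+1) i' (j+1) hj]
        simp
    unfold pvAInner
    simp only [hsj]
    rw [hread (k:Int) (by positivity) hk]
    have hdropj : sizes.drop j = sizes[j] :: sizes.drop (j+1) := List.drop_eq_getElem_cons hjlen
    have hdropj1 : sizes.drop (j+1) = sizes[j+1] :: sizes.drop (j+2) := List.drop_eq_getElem_cons hj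
    have hval : max (pvG (sizes.drop (j+1)) (k:Int))
        (if (k:Int) ≥ sizes[j] then
          PySem.List.pyGetD (PySem.List.pyGetD ((PySem.List.pyRange 0 (limit+1) 1).map
            (fun i => if i < (k:Int) then pvRow sizes j i else pvRow sizes (j+1) i)) ((k:Int) - sizes[j]) [])
            ((j:Int)+1) 0 + sizes[j]
        else 0) = pvG (sizes.drop j) (k:Int) := by
      obtain ⟨b, r, hbr⟩ : ∃ b r, sizes.drop (j+1) = b :: r := ⟨_, _, hdropj1⟩
      by_cases hg : (k:Int) ≥ sizes[j]
      · rw [if_pos hg, hread ((k:Int) - sizes[j]) (by omega) (by omega)]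
        rw [hdropj, hbr]
        conv_rhs => rw [pvG]
        rw [if_pos (by omega : sizes[j] ≤ (k:Int))]
      · rw [if_neg hg]
        rw [hdropj, hbr]
        conv_rhs => rw [pvG]
        rw [if_neg (by omega : ¬ sizes[j] ≤ (k:Int))]
    rw [hval]
    unfold pvSetAt
    rw [PySem.List.pyGetD_map_pyRange_of_nonneg _ _ _ _ (by positivity) hk]
    rw [if_neg (lt_irrefl (k:Int))]
    simp only [PySem.List.pySetD_natCast]
    rw [pvRow_set_col sizes j (k:Int) hjlen]
    exact pv_mix_set _ _ limit k hk
  rw [pv_foldl_set (limit+1) (by omega) _ (pvRow sizes j) _ hstep]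
  apply List.map_congr_left
  intro i hi
  have h2 := (PySem.List.mem_pyRange_one.mp hi).2
  simp [h2]

theorem pvA_outer_fold (sizes : List Int) (limit : Int) (h0 : 0 ≤ limit)
    (hnn : ∀ x ∈ sizes, 0 ≤ x) :
    ∀ c : Nat, c ≤ sizes.length - 1 →
    (PySem.List.pyRange ((c:Int)-1) (-1) (-1)).foldl (pvAOuter sizes) (pvMat sizes limit c)
      = pvMat sizes limit 0 := by
  intro c
  induction c with
  | zero =>
    intro _
    rw [PySem.List.pyRange_neg_one_eq_nil (by norm_num)]
    rfl
  | succ c ih =>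
    intro hc
    have hcast : ((c+1 : Nat) : Int) - 1 = (c : Int) := by push_cast; ring
    rw [hcast, PySem.List.pyRange_neg_one_cons (by omega : (-1:Int) < (c:Int)), List.foldl_cons]
    rw [pvA_inner sizes limit c (by omega) h0 hnn]
    exact ih (by omega)

theorem pvA_eq_pvG (sizes : List Int) (limit : Int) (hne : sizes ≠ []) (h0 : 0 ≤ limit)
    (hnn : ∀ x ∈ sizes, 0 ≤ x) :
    knapscak_without_profit_bottom_up sizes limit = pvG sizes limit := by
  have hn : 0 < sizes.length := List.length_pos_iff.mpr hne
  show PySem.List.pyGetD (PySem.List.pyGetD ((PySem.List.pyRange (((PySem.List.pyGetD ((PySem.List.pyRange 0 ((pvAInit sizes limit).length : Int) 1).foldl (pvAStep1 sizes) (pvAInit sizes limit)) 0 []).length : Int) - 2) (-1) (-1)).foldl (pvAOuter sizes) ((PySem.List.pyRange 0 ((pvAInit sizes limit).length : Int) 1).foldl (pvAStep1 sizes) (pvAInit sizes limit))) limit []) 0 0 = pvG sizes limit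
  rw [pvA_first sizes limit hne h0]
  have hrow0 : PySem.List.pyGetD (pvMat sizes limit (sizes.length - 1)) 0 []
      = pvRow sizes (sizes.length - 1) 0 := by
    unfold pvMat
    rw [PySem.List.pyGetD_map_pyRange_of_nonneg _ _ _ _ (le_refl 0) (by omega)]
  rw [hrow0, pvRow_length]
  have hcast : (sizes.length : Int) - 2 = ((sizes.length - 1 : Nat) : Int) - 1 := by
    push_cast [hn]
    omega
  rw [hcast, pvA_outer_fold sizes limit h0 hnn (sizes.length - 1) (le_refl _)]
  have hrowL : PySem.List.pyGetD (pvMat sizes limit 0) limit [] = pvRow sizes 0 limit := by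
    unfold pvMat
    rw [PySem.List.pyGetD_map_pyRange_of_nonneg _ _ _ _ h0 (by omega)]
  rw [hrowL]
  have := pvRow_get sizes 0 limit 0 hn
  rw [show ((0:Nat):Int) = (0:Int) from rfl] at this
  rw [this]
  simp

-- ===== VERDICT (by name: the statement is the Claim_ definition above) =====
theorem knapscak_without_profit_bottom_up_spec : Claim_unchanged_knapscak_without_profit_bottom_up := by
  intro sizes limit _ hpre
  obtain ⟨hne, h0, hdrop⟩ := hpre
  unfold Spec_knapscak_without_profit_bottom_up
  intro hD
  unfold D_knapscak_without_profit_bottom_up at hD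
  have hnn : ∀ x ∈ sizes, 0 ≤ x := by
    rcases List.eq_nil_or_concat sizes with rfl | ⟨ys, t, rfl⟩
    · exact absurd rfl hne
    · simp only [List.concat_eq_append] at hD hdrop ⊢
      rw [List.getLastD_concat] at hD
      rw [List.dropLast_concat] at hdrop
      intro x hx
      rcases List.mem_append.mp hx with h | h
      · exact hdrop x h
      · have : x = t := List.mem_singleton.mp h
        omega
  rw [pvA_eq_pvG sizes limit hne h0 hnn]
  exact pvIsMax_unique (pvG_isMax sizes limit hne hnn h0) (pvB_isMax sizes limit h0 hnn)

theorem knapscak_without_profit_bottom_up_changed : Claim_changed_knapscak_without_profit_bottom_up := by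
  unfold Claim_changed_knapscak_without_profit_bottom_up
  decide
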